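-- pv_equiv track=rewrite | github.com/gHashTag/vibee-lang | research/p_adic_algorithms.py | trinity_sort_partitions
-- ===== SOURCE A (Python) =====
-- def trinity_sort_partitions(n, depth=0):
--     """Analyze partition structure of Trinity Sort"""
--     if n <= 27:  # Base case: 3³
--         return [(depth, n, "base")]
--
--     # 3-way partition creates ~3 subproblems
--     third = n // 3
--     return [(depth, n, "partition")] + \
--            trinity_sort_partitions(third, depth+1) + \
--            trinity_sort_partitions(third, depth+1) + \
--            trinity_sort_partitions(third, depth+1)
-- ===== SOURCE B (Python) =====
-- def trinity_sort_partitions(n, depth=0):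
--     """Iterative pre-order traversal with an explicit stack (no recursion)."""
--     result = []
--     stack = [(n, depth)]
--     while stack:
--         m, d = stack.pop()
--         if m <= 27:
--             result.append((d, m, "base"))
--         else:
--             result.append((d, m, "partition"))
--             third = m // 3
--             stack.append((third, d + 1))
--             stack.append((third, d + 1))
--             stack.append((third, d + 1))
--     return result
-- ===== Notes on version B (the rewrite author's own statement) =====
-- stated objective: alternative
-- what changed: Replaces the 3-way recursion (building the list by concatenating three recursive calls) with an iterative pre-order traversal using an explicit stack and a single result accumulator.
import Mathlib
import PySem

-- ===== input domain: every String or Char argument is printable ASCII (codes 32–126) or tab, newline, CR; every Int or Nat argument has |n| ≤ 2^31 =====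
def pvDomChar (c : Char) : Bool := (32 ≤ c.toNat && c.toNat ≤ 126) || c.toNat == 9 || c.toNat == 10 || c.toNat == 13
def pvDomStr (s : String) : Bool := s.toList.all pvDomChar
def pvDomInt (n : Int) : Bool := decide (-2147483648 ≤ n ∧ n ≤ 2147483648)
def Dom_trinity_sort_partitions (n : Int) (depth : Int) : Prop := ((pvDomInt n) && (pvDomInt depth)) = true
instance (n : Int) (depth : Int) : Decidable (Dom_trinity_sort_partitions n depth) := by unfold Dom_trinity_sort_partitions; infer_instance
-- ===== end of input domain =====

-- B replaces A's 3-way recursion by an iterative pre-order traversal with an explicit stack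
-- (objective: alternative decomposition; same output, single accumulator instead of list concatenation).

-- ===== PORT A =====
-- literal transliteration of A's recursion; terminates since n // 3 shrinks n.toNat when n > 27
def trinity_sort_partitions (n : Int) (depth : Int) : List (Int × Int × String) :=
  if n ≤ 27 then
    [(depth, n, "base")]
  else
    let third := PySem.Int.floordiv n 3
    [(depth, n, "partition")] ++
      trinity_sort_partitions third (depth + 1) ++
      trinity_sort_partitions third (depth + 1) ++
      trinity_sort_partitions third (depth + 1)
termination_by n.toNat
decreasing_by
  all_goals
    rw [PySem.Int.floordiv_eq_ediv_of_pos (by omega : (0:Int) < 3)]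
    omega

-- ===== PORT B =====
-- B-side helper: the while-loop over the explicit stack (top of stack = head of list);
-- Python's three identical pushes become three conses.
def pvLoop_trinity (stack : List (Int × Int)) (result : List (Int × Int × String)) :
    List (Int × Int × String) :=
  match stack with
  | [] => result
  | (m, d) :: rest =>
    if m ≤ 27 then
      pvLoop_trinity rest (result ++ [(d, m, "base")])
    else
      let third := PySem.Int.floordiv m 3
      pvLoop_trinity ((third, d + 1) :: (third, d + 1) :: (third, d + 1) :: rest)
        (result ++ [(d, m, "partition")])
termination_by (stack.map (fun p => 4 ^ p.1.toNat)).sum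
decreasing_by
  · simp only [List.map_cons, List.sum_cons]
    have : 0 < 4 ^ m.toNat := by positivity
    omega
  · simp only [List.map_cons, List.sum_cons]
    rw [PySem.Int.floordiv_eq_ediv_of_pos (by omega : (0:Int) < 3)]
    have ht : (m / 3).toNat < m.toNat := by omega
    have h1 : 4 ^ (m / 3).toNat * 4 ≤ 4 ^ m.toNat := by
      calc 4 ^ (m / 3).toNat * 4 = 4 ^ ((m / 3).toNat + 1) := by ring
        _ ≤ 4 ^ m.toNat := Nat.pow_le_pow_right (by omega) (by omega)
    have h2 : 0 < 4 ^ (m / 3).toNat := by positivity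
    omega

def trinity_sort_partitions_alt (n : Int) (depth : Int) : List (Int × Int × String) :=
  pvLoop_trinity [(n, depth)] []

-- ===== PRECONDITION & SPEC =====
def Spec_trinity_sort_partitions (n : Int) (depth : Int) (out : List (Int × Int × String)) : Prop := out = trinity_sort_partitions_alt n depth
instance (n : Int) (depth : Int) (out : List (Int × Int × String)) : Decidable (Spec_trinity_sort_partitions n depth out) := by unfold Spec_trinity_sort_partitions; infer_instance

-- ===== CLAIM (what is proved, stated in full; the proofs are below) =====
def Claim_equal_trinity_sort_partitions : Prop := ∀ (n : Int) (depth : Int), Dom_trinity_sort_partitions n depth → Spec_trinity_sort_partitions n depth (trinity_sort_partitions n depth)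

-- ===== LEMMAS AND PROOFS =====

-- Loop invariant: the stack loop appends, in order, A's output for every pending stack entry.
theorem pvLoop_trinity_invariant (stack : List (Int × Int)) (result : List (Int × Int × String)) :
    pvLoop_trinity stack result =
      result ++ (stack.map (fun p => trinity_sort_partitions p.1 p.2)).flatten := by
  fun_induction pvLoop_trinity stack result with
  | case1 result => simp
  | case2 result m d rest hle ih =>
    rw [ih]
    conv_rhs => rw [List.map_cons, List.flatten_cons, trinity_sort_partitions.eq_def]
    simp [hle]
  | case3 result m d rest hle third ih =>
    rw [ih]
    have hthird : third = PySem.Int.floordiv m 3 := rfl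
    rw [hthird]
    conv_rhs => rw [List.map_cons, List.flatten_cons, trinity_sort_partitions.eq_def]
    simp [hle, List.append_assoc]

-- ===== VERDICT (by name: the statement is the Claim_ definition above) =====
theorem trinity_sort_partitions_spec : Claim_equal_trinity_sort_partitions := by
  intro n depth _
  unfold Spec_trinity_sort_partitions trinity_sort_partitions_alt
  rw [pvLoop_trinity_invariant]
  simp
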